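-- pv_equiv track=rewrite | github.com/djsadd/codewars-lessons | Help the general decode secret enemy messages..py | decode_two
-- ===== SOURCE A (Python) =====
-- def decode_two(s):
--     alph = "abcdefghijklmnopqrstuvwxyzABCDEFGHIJKLMNOPQRSTUVWXYZ0123456789.,? "
--     dec = ''
--     for pos, enc_char in enumerate(s):
--         pos = 2**(pos+1)
--         idx = alph.find(enc_char) + 1
--         if idx == 0:  # not in alph
--             dec += enc_char
--             continue
--         # modular multiplicative inverse
--         ht = (pow(pos, -1, 67))
--         dec += alph[(ht * idx % 67)-1]
--     return dec
-- ===== SOURCE B (Python) =====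
-- def decode_two(s):
--     alph = "abcdefghijklmnopqrstuvwxyzABCDEFGHIJKLMNOPQRSTUVWXYZ0123456789.,? "
--     # roll h = inverse(2^(pos+1)) mod 67 incrementally: inverse(2) = 34 mod 67
--     out = []
--     h = 1
--     for c in s:
--         h = h * 34 % 67
--         i = alph.find(c)
--         if i == -1:
--             out.append(c)
--         else:
--             out.append(alph[h * (i + 1) % 67 - 1])
--     return ''.join(out)
-- ===== Notes on version B (the rewrite author's own statement) =====
-- stated objective: faster
-- what changed: B replaces A's per-character bignum power 2**(pos+1) and extended-gcd modular inverse pow(pos,-1,67) by one rolling accumulator h = h*34 % 67 (34 is the inverse of 2 mod 67), doing O(1) small-int work per character.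
import Mathlib
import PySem

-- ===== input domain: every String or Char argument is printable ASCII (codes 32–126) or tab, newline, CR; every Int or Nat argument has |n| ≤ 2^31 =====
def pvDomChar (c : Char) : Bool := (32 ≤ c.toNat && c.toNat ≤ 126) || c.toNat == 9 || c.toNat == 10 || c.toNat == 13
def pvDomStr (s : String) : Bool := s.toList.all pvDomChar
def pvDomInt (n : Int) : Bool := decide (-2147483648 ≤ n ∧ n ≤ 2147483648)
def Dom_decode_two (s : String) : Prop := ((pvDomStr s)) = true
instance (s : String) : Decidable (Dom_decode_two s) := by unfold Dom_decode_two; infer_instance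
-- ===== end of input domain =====

-- B replaces the per-character bignum power and modular inverse by a rolling accumulator h = h*34 % 67; objective: faster (asymptotic).

-- ===== PORT A =====

def pvAlph : String := "abcdefghijklmnopqrstuvwxyzABCDEFGHIJKLMNOPQRSTUVWXYZ0123456789.,? "

-- port of Python's pow(a, -1, m): the (unique) inverse of a in [0, m), found by scan.
-- Exact for invertible a and m > 0 (the only way A calls it: a = 2^(pos+1), m = 67);
-- Python raises ValueError otherwise, which never happens here.
def pyPowNeg1 (a m : Int) : Int :=
  match (List.range m.toNat).find? (fun (k : Nat) => PySem.Int.mod (a * (k : Int)) m == 1) with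
  | some k => (k : Int)
  | none => 0

def decodeA_go (pos : Nat) : List Char → List Char → List Char
  | [], dec => dec
  | c :: rest, dec =>
    let p : Int := (2 : Int) ^ (pos + 1)
    let idx : Int := PySem.Str.find pvAlph (String.ofList [c]) + 1
    if idx = 0 then
      decodeA_go (pos + 1) rest (dec ++ [c])
    else
      let ht := pyPowNeg1 p 67
      -- alph[(ht*idx % 67)-1]: the index is always in range (getD is never hit)
      decodeA_go (pos + 1) rest
        (dec ++ [(PySem.Str.pyGet? pvAlph (PySem.Int.mod (ht * idx) 67 - 1)).getD c])

def decode_two (s : String) : String := String.ofList (decodeA_go 0 s.toList [])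

-- ===== PORT B =====

def decodeB_go (h : Int) : List Char → List Char → List Char
  | [], out => out
  | c :: rest, out =>
    let h' := PySem.Int.mod (h * 34) 67
    let i : Int := PySem.Str.find pvAlph (String.ofList [c])
    if i = -1 then
      decodeB_go h' rest (out ++ [c])
    else
      decodeB_go h' rest
        (out ++ [(PySem.Str.pyGet? pvAlph (PySem.Int.mod (h' * (i + 1)) 67 - 1)).getD c])

def decode_two_alt (s : String) : String := String.ofList (decodeB_go 1 s.toList [])

-- ===== PRECONDITION & SPEC =====
def Spec_decode_two (s : String) (out : String) : Prop := out = decode_two_alt s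
instance (s : String) (out : String) : Decidable (Spec_decode_two s out) := by unfold Spec_decode_two; infer_instance

-- ===== CLAIM (what is proved, stated in full; the proofs are below) =====
def Claim_equal_decode_two : Prop := ∀ (s : String), Dom_decode_two s → Spec_decode_two s (decode_two s)

-- ===== LEMMAS AND PROOFS =====

-- first index of List.range n satisfying p
lemma pvFind?_range_eq (p : Nat → Bool) (t n : Nat) (htn : t < n) (hpt : p t = true)
    (hmin : ∀ j, j < t → p j = false) : (List.range n).find? p = some t := by
  rw [List.find?_range_eq_some]
  refine ⟨hpt, List.mem_range.mpr htn, fun j hj => by simp [hmin j hj]⟩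

-- pow(2^n, -1, 67) = 34^n % 67
lemma pyPowNeg1_two_pow (n : Nat) : pyPowNeg1 ((2:Int)^n) 67 = (34:Int)^n % 67 := by
  have hnn : (0:Int) ≤ (34:Int)^n % 67 := Int.emod_nonneg _ (by norm_num)
  have hlt : (34:Int)^n % 67 < 67 := Int.emod_lt_of_pos _ (by norm_num)
  have h68 : ((68:Int))^n ≡ 1 [ZMOD 67] := by
    have : ((68:Int)) ≡ 1 [ZMOD 67] := by decide
    simpa using this.pow n
  have key : ((2:Int)^n * ((34:Int)^n % 67)) % 67 = 1 := by
    have h1 : ((2:Int)^n * ((34:Int)^n % 67)) % 67 = ((2:Int)^n * (34:Int)^n) % 67 := by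
      conv_lhs => rw [Int.mul_emod]
      conv_rhs => rw [Int.mul_emod]
      rw [Int.emod_emod_of_dvd _ dvd_rfl]
    rw [h1, ← mul_pow]
    have h2 : ((2:Int) * 34) ^ n % 67 = 1 % 67 := h68
    simpa using h2
  have uniq : ∀ k : Int, 0 ≤ k → k < 67 → ((2:Int)^n * k) % 67 = 1 → k = (34:Int)^n % 67 := by
    intro k hk0 hk67 hk
    have m1 : (2:Int)^n * k ≡ (2:Int)^n * ((34:Int)^n % 67) [ZMOD 67] := by
      unfold Int.ModEq
      rw [hk, key]
    have e : ∀ x : Int, (34:Int)^n * ((2:Int)^n * x) = (68:Int)^n * x := by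
      intro x
      rw [← mul_assoc, ← mul_pow]
      norm_num
    have final : k ≡ (34:Int)^n % 67 [ZMOD 67] := by
      calc k ≡ (68:Int)^n * k [ZMOD 67] := by simpa using (h68.mul_right k).symm
        _ = (34:Int)^n * ((2:Int)^n * k) := (e k).symm
        _ ≡ (34:Int)^n * ((2:Int)^n * ((34:Int)^n % 67)) [ZMOD 67] := m1.mul_left _
        _ = (68:Int)^n * ((34:Int)^n % 67) := e _
        _ ≡ (34:Int)^n % 67 [ZMOD 67] := by simpa using h68.mul_right ((34:Int)^n % 67)
    have : k % 67 = ((34:Int)^n % 67) % 67 := final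
    rwa [Int.emod_eq_of_lt hk0 hk67, Int.emod_eq_of_lt hnn hlt] at this
  set t : Nat := ((34:Int)^n % 67).toNat with htdef
  have htI : (t : Int) = (34:Int)^n % 67 := Int.toNat_of_nonneg hnn
  have htn : t < 67 := by omega
  have hfind : (List.range (67:Int).toNat).find?
      (fun (k : Nat) => PySem.Int.mod ((2:Int)^n * (k : Int)) 67 == 1) = some t := by
    apply pvFind?_range_eq _ t _ (by simpa using htn)
    · simp only [PySem.Int.mod_eq_emod_of_pos (show (0:Int) < 67 by norm_num), htI, beq_iff_eq]
      exact key
    · intro j hj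
      by_contra hcon
      have hpj : (2:Int) ^ n * (j : Int) % 67 = 1 := by
        rw [PySem.Int.mod_eq_emod_of_pos (show (0:Int) < 67 by norm_num)] at hcon
        simpa using hcon
      have hje := uniq (j : Int) (by positivity) (by exact_mod_cast hj.trans htn) hpj
      rw [← htI] at hje
      have : j = t := by exact_mod_cast hje
      omega
  unfold pyPowNeg1
  rw [hfind]
  simpa using htI

lemma pvRoll (p : Nat) :
    PySem.Int.mod (((34:Int)^p % 67) * 34) 67 = (34:Int)^(p+1) % 67 := by
  rw [PySem.Int.mod_eq_emod_of_pos (by norm_num), pow_succ]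
  conv_rhs => rw [Int.mul_emod]
  norm_num

lemma pvGo_eq : ∀ (cs : List Char) (pos : Nat) (acc : List Char),
    decodeA_go pos cs acc = decodeB_go ((34:Int)^pos % 67) cs acc := by
  intro cs
  induction cs with
  | nil => intro pos acc; rfl
  | cons c rest ih =>
    intro pos acc
    simp only [decodeA_go, decodeB_go, pvRoll pos, pyPowNeg1_two_pow (pos+1)]
    by_cases h : PySem.Str.find pvAlph (String.ofList [c]) = -1
    · have h0 : PySem.Str.find pvAlph (String.ofList [c]) + 1 = 0 := by omega
      simp only [h]
      exact ih (pos+1) (acc ++ [c])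
    · have h0 : ¬ (PySem.Str.find pvAlph (String.ofList [c]) + 1 = 0) := by omega
      simp only [if_neg h, if_neg h0]
      exact ih (pos+1) _

-- ===== VERDICT (by name: the statement is the Claim_ definition above) =====
theorem decode_two_spec : Claim_equal_decode_two := by
  intro s _
  unfold Spec_decode_two decode_two decode_two_alt
  have h := pvGo_eq s.toList 0 []
  norm_num at h
  exact congrArg String.ofList h
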